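-- pv_equiv track=rewrite | github.com/Keijukainen311/NRRPGen | Generator/check_hc_inital.py | hc8_min_consec_days_off
-- ===== SOURCE A (Python) =====
-- def hc8_min_consec_days_off(array, min_consec_days_off):
--     for work_days in array:
--         count = 0
--         for i, num in enumerate(work_days):
--             if num == 0:  # Day off (represented as 0)
--                 count += 1
--             else:
--                 # If nurse had consecutive days off but fewer than the required amount, return False
--                 # Ignore this if the count starts on the first day (i == 0)
--                 if count > 0 and count < min_consec_days_off and i - count > 0:
--                     return False
--                 count = 0
--         # At the end of the loop, check if the last consecutive days off are fewer than required,
--         # but ignore if this segment ends on the last day of the schedule.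
--         if count > 0 and count < min_consec_days_off and i != len(work_days) - 1:
--             return False
--     return True
-- ===== SOURCE B (Python) =====
-- def _runs_of(work_days):
--     """Run-length encode work_days keyed on 'is a day off' (num == 0)."""
--     runs = []
--     i, n = 0, len(work_days)
--     while i < n:
--         key = (work_days[i] == 0)
--         j = i + 1
--         while j < n and (work_days[j] == 0) == key:
--             j += 1
--         runs.append((key, j - i))
--         i = j
--     return runs
--
--
-- def hc8_min_consec_days_off(array, min_consec_days_off):
--     for work_days in array:
--         runs = _runs_of(work_days)
--         # Only interior runs are constrained: the schedule's leading and
--         # trailing runs are exempt.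
--         for is_off, length in runs[1:-1]:
--             if is_off and length < min_consec_days_off:
--                 return False
--     return True
-- ===== Notes on version B (the rewrite author's own statement) =====
-- stated objective: idiomatic
-- what changed: B run-length-encodes each schedule into (is_day_off, length) runs with a two-pointer scan and then just checks the interior runs (first and last run exempt), replacing A's index/counter state machine with its always-false end-of-loop check.
import Mathlib
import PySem

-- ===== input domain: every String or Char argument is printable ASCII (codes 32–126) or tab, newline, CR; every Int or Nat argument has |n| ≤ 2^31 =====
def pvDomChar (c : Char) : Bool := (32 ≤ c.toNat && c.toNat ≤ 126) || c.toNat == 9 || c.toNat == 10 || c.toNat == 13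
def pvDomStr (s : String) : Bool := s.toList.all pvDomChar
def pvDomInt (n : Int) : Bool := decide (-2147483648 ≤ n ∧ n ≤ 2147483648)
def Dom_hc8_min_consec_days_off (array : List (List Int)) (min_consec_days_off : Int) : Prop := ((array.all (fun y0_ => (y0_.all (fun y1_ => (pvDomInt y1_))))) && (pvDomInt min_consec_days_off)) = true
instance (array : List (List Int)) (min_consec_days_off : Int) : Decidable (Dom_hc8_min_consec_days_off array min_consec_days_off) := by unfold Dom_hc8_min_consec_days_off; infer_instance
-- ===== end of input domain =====

-- B replaces A's index-and-counter scan by a run-length encoding of each schedule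
-- and a check over the interior runs only (objective: idiomatic decomposition, no speed claim).


-- ===== PORT A =====
-- inner loop of A: `count` is the running day-off counter, `i` the index of the
-- NEXT element (so Python's `i` after the loop is our `i - 1` at the end check;
-- at an empty schedule the check is short-circuited by count = 0, as in Python).
def pvGoA (m len : Int) : List Int → Int → Int → Bool
  | [], count, i => !(decide (0 < count ∧ count < m ∧ i - 1 ≠ len - 1))
  | num :: rest, count, i =>
    if num = 0 then pvGoA m len rest (count + 1) (i + 1)
    else if 0 < count ∧ count < m ∧ i - count > 0 then false
    else pvGoA m len rest 0 (i + 1)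

def hc8_min_consec_days_off : List (List Int) → Int → Bool
  | [], _ => true
  | wd :: rest, m => pvGoA m (wd.length : Int) wd 0 0 && hc8_min_consec_days_off rest m

-- ===== PORT B =====
-- _runs_of: run-length encode the schedule keyed on (num == 0), by repeatedly
-- scanning one maximal run (the two-pointer while loops become takeWhile/dropWhile).
def pvRunsOf : List Int → List (Bool × Int)
  | [] => []
  | x :: rest =>
    let key := decide (x = 0)
    (key, 1 + ((rest.takeWhile (fun y => decide (y = 0) == key)).length : Int))
      :: pvRunsOf (rest.dropWhile (fun y => decide (y = 0) == key))
  termination_by l => l.length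
  decreasing_by
    have := List.length_dropWhile_le (fun y => decide (y = 0) == decide (x = 0)) rest
    simp; omega

-- per-schedule check of B: any interior day-off run shorter than required?
def pvRowB (m : Int) (wd : List Int) : Bool :=
  !((PySem.List.slice (pvRunsOf wd) (some 1) (some (-1))).any
      (fun r => r.1 && decide (r.2 < m)))

def hc8_min_consec_days_off_alt (array : List (List Int)) (min_consec_days_off : Int) : Bool :=
  array.all (fun wd => pvRowB min_consec_days_off wd)

-- ===== PRECONDITION & SPEC =====
def Spec_hc8_min_consec_days_off (array : List (List Int)) (min_consec_days_off : Int) (out : Bool) : Prop := out = hc8_min_consec_days_off_alt array min_consec_days_off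
instance (array : List (List Int)) (min_consec_days_off : Int) (out : Bool) : Decidable (Spec_hc8_min_consec_days_off array min_consec_days_off out) := by unfold Spec_hc8_min_consec_days_off; infer_instance

-- ===== CLAIM (what is proved, stated in full; the proofs are below) =====
def Claim_equal_hc8_min_consec_days_off : Prop := ∀ (array : List (List Int)) (min_consec_days_off : Int), Dom_hc8_min_consec_days_off array min_consec_days_off → Spec_hc8_min_consec_days_off array min_consec_days_off (hc8_min_consec_days_off array min_consec_days_off)

-- ===== LEMMAS AND PROOFS =====

-- "no bad run among all but the last": the invariant B's interior check satisfies
-- on the suffix after the leading run.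
def pvF (m : Int) (rs : List (Bool × Int)) : Bool :=
  !(rs.dropLast.any (fun r => r.1 && decide (r.2 < m)))

theorem pvF_false_cons (m c : Int) (rs : List (Bool × Int)) :
    pvF m ((false, c) :: rs) = pvF m rs := by
  cases rs <;> simp [pvF]

theorem pvF_cons_cons (m c : Int) (r : Bool × Int) (rs : List (Bool × Int)) :
    pvF m ((true, c) :: r :: rs) = (!(decide (c < m)) && pvF m (r :: rs)) := by
  simp [pvF]

-- A's inner loop over a block of zeros: count and index advance by the block length.
theorem pvGoA_zeros (m len : Int) (blk : List Int) (h : ∀ x ∈ blk, x = 0) :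
    ∀ rest count i, pvGoA m len (blk ++ rest) count i
      = pvGoA m len rest (count + (blk.length : Int)) (i + (blk.length : Int)) := by
  induction blk with
  | nil => intro rest count i; simp
  | cons x bl ih =>
    intro rest count i
    have hx : x = 0 := h x (by simp)
    have hbl : ∀ y ∈ bl, y = 0 := fun y hy => h y (by simp [hy])
    simp only [List.cons_append, pvGoA, hx, ih hbl]
    have e1 : count + 1 + (bl.length : Int) = count + ((bl.length : Int) + 1) := by ring
    have e2 : i + 1 + (bl.length : Int) = i + ((bl.length : Int) + 1) := by ring
    rw [List.length_cons]
    push_cast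
    rw [e1, e2]

-- A's inner loop over a nonempty block of nonzeros: one check at entry, then reset.
theorem pvGoA_nonzeros (m len : Int) (blk : List Int) (h : ∀ x ∈ blk, x ≠ 0) (hne : blk ≠ []) :
    ∀ rest count i, pvGoA m len (blk ++ rest) count i
      = if 0 < count ∧ count < m ∧ i - count > 0 then false
        else pvGoA m len rest 0 (i + (blk.length : Int)) := by
  induction blk with
  | nil => exact absurd rfl hne
  | cons x bl ih =>
    intro rest count i
    have hx : x ≠ 0 := h x (by simp)
    have hbl : ∀ y ∈ bl, y ≠ 0 := fun y hy => h y (by simp [hy])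
    simp only [List.cons_append, pvGoA, if_neg hx]
    by_cases hc : 0 < count ∧ count < m ∧ i - count > 0
    · rw [if_pos hc, if_pos hc]
    · rw [if_neg hc, if_neg hc]
      cases bl with
      | nil => norm_num
      | cons b bl' =>
        rw [ih hbl (by simp), if_neg (by omega)]
        congr 1
        simp only [List.length_cons]
        push_cast
        ring

-- main invariant: past the leading run, A's scan computes B's "no bad run among
-- all but the last" check of the remaining suffix.
theorem pvG (m len : Int) : ∀ n (s : List Int), s.length ≤ n → ∀ i : Int, 1 ≤ i →
    i + (s.length : Int) = len → pvGoA m len s 0 i = pvF m (pvRunsOf s) := by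
  intro n
  induction n with
  | zero =>
    intro s hs i hi hlen
    have : s = [] := List.eq_nil_of_length_eq_zero (Nat.le_zero.mp hs)
    subst this
    simp [pvGoA, pvRunsOf, pvF]
  | succ n ih =>
    intro s hs i hi hlen
    cases s with
    | nil => simp [pvGoA, pvRunsOf, pvF]
    | cons x rest =>
      by_cases hx : x = 0
      · -- leading zero run
        subst hx
        set p := fun y : Int => decide (y = 0) == decide ((0:Int) = 0) with hp
        have hsplit : rest.takeWhile p ++ rest.dropWhile p = rest := List.takeWhile_append_dropWhile
        set blk := rest.takeWhile p with hblk
        set rest2 := rest.dropWhile p with hrest2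
        have hblk0 : ∀ y ∈ (0:Int) :: blk, y = 0 := by
          intro y hy
          rcases List.mem_cons.mp hy with h | h
          · exact h
          · have := List.mem_takeWhile_imp h
            simpa [hp] using this
        have hs' : ((0:Int) :: rest) = ((0:Int) :: blk) ++ rest2 := by
          simp [hblk, hrest2]
        set c : Int := 1 + (blk.length : Int) with hc
        have hc1 : 1 ≤ c := by have := Int.natCast_nonneg blk.length; omega
        have hzero := pvGoA_zeros m len ((0:Int) :: blk) hblk0 rest2 0 i
        have hruns : pvRunsOf ((0:Int) :: rest) = (true, c) :: pvRunsOf rest2 := by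
          rw [pvRunsOf]; simp [hp, hblk, hrest2, hc]
        have hlen2 : i + c + (rest2.length : Int) = len := by
          have : blk.length + rest2.length = rest.length := by
            rw [hblk, hrest2, ← List.length_append, hsplit]
          simp only [List.length_cons] at hlen
          push_cast at hlen ⊢
          omega
        have hzero' := hzero
        rw [← hs'] at hzero'
        rw [hzero']
        simp only [List.length_cons]
        have harg : (0 : Int) + ((blk.length + 1 : Nat) : Int) = c := by push_cast; omega
        have harg2 : i + ((blk.length + 1 : Nat) : Int) = i + c := by push_cast; omega
        rw [harg, harg2, hruns]
        cases hr2 : rest2 with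
        | nil =>
          -- trailing zero run: the end check is vacuous (last index reached)
          rw [hr2] at hlen2
          have hl : i + c - 1 = len - 1 := by simp at hlen2; omega
          simp [pvGoA, pvF, hl, pvRunsOf]
        | cons y r2' =>
          have hy : y ≠ 0 := by
            have h0 := List.head?_dropWhile_not p rest
            rw [← hrest2, hr2] at h0
            simp [hp] at h0
            exact h0
          -- following nonzero run
          set q := fun z : Int => decide (z = 0) == decide (y = 0) with hq
          have hsplit' : r2'.takeWhile q ++ r2'.dropWhile q = r2' := List.takeWhile_append_dropWhile
          set nblk := r2'.takeWhile q with hnblk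
          set rest3 := r2'.dropWhile q with hrest3
          have hnz : ∀ z ∈ y :: nblk, z ≠ 0 := by
            intro z hz
            rcases List.mem_cons.mp hz with h | h
            · exact h ▸ hy
            · intro h0
              have := List.mem_takeWhile_imp h
              simp [hq, h0] at this
              exact hy this
          have hr2s : y :: r2' = (y :: nblk) ++ rest3 := by
            simp [hnblk, hrest3]
          set nl : Int := 1 + (nblk.length : Int) with hnl
          have hstep := pvGoA_nonzeros m len (y :: nblk) hnz (by simp) rest3 c (i + c)
          rw [← hr2s] at hstep
          rw [hstep]
          have hruns2 : pvRunsOf (y :: r2') = (false, nl) :: pvRunsOf rest3 := by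
            rw [pvRunsOf]; simp [hq, hnblk, hrest3, hnl, hy]
          have ih3 : pvGoA m len rest3 0 (i + c + ((y :: nblk).length : Int)) = pvF m (pvRunsOf rest3) := by
            apply ih rest3
            · have h2 : nblk.length + rest3.length = r2'.length := by
                rw [hnblk, hrest3, ← List.length_append, hsplit']
              have : rest2.length ≤ rest.length := by
                rw [hrest2]; exact List.length_dropWhile_le p rest
              rw [hr2] at this
              simp only [List.length_cons] at this hs
              omega
            · simp only [List.length_cons]; push_cast; omega
            · have h2' : nblk.length + rest3.length = r2'.length := by
                rw [hnblk, hrest3, ← List.length_append, hsplit']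
              have hlenr : blk.length + rest2.length = rest.length := by
                rw [hblk, hrest2, ← List.length_append, hsplit]
              rw [hr2] at hlenr
              simp only [List.length_cons] at hlenr hlen ⊢
              push_cast at hlen ⊢
              omega
          rw [ih3, hruns2, pvF_cons_cons]
          by_cases hm : c < m
          · rw [if_pos (by constructor; omega; constructor; exact hm; omega)]
            simp [hm]
          · rw [if_neg (by intro h; exact hm h.2.1)]
            simp [hm, pvF_false_cons]
      · -- leading nonzero run
        set p := fun y : Int => decide (y = 0) == decide (x = 0) with hp
        have hsplit : rest.takeWhile p ++ rest.dropWhile p = rest := List.takeWhile_append_dropWhile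
        set blk := rest.takeWhile p with hblk
        set rest2 := rest.dropWhile p with hrest2
        have hnz : ∀ y ∈ x :: blk, y ≠ 0 := by
          intro y hy
          rcases List.mem_cons.mp hy with h | h
          · exact h ▸ hx
          · intro h0
            have := List.mem_takeWhile_imp h
            simp [hp, h0, hx] at this
        have hs' : (x :: rest) = (x :: blk) ++ rest2 := by simp [hblk, hrest2]
        have hstep := pvGoA_nonzeros m len (x :: blk) hnz (by simp) rest2 0 i
        rw [← hs'] at hstep
        rw [hstep, if_neg (by omega)]
        have hruns : pvRunsOf (x :: rest) = (false, 1 + (blk.length : Int)) :: pvRunsOf rest2 := by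
          rw [pvRunsOf]; simp [hp, hblk, hrest2, hx]
        have hlenr : blk.length + rest2.length = rest.length := by
          rw [hblk, hrest2, ← List.length_append, hsplit]
        have ih2 : pvGoA m len rest2 0 (i + ((x :: blk).length : Int)) = pvF m (pvRunsOf rest2) := by
          apply ih rest2
          · have : rest2.length ≤ rest.length := by
              rw [hrest2]; exact List.length_dropWhile_le p rest
            simp only [List.length_cons] at hs
            omega
          · simp only [List.length_cons]; push_cast; omega
          · simp only [List.length_cons] at hlen ⊢
            push_cast at hlen ⊢
            omega
        rw [ih2, hruns, pvF_false_cons]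

-- the slice runs[1:-1] drops the first and last run
theorem slice_one_negone (xs : List (Bool × Int)) :
    PySem.List.slice xs (some 1) (some (-1)) = xs.tail.dropLast := by
  cases xs with
  | nil => simp [PySem.List.slice]
  | cons x t => simp [PySem.List.slice, List.dropLast_eq_take]

-- per-schedule equivalence
theorem row_eq (m : Int) (wd : List Int) :
    pvGoA m (wd.length : Int) wd 0 0 = pvRowB m wd := by
  cases wd with
  | nil => simp [pvGoA, pvRowB, pvRunsOf, slice_one_negone]
  | cons x rest =>
    unfold pvRowB
    rw [slice_one_negone]
    by_cases hx : x = 0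
    · subst hx
      set p := fun y : Int => decide (y = 0) == decide ((0:Int) = 0) with hp
      have hsplit : rest.takeWhile p ++ rest.dropWhile p = rest := List.takeWhile_append_dropWhile
      set blk := rest.takeWhile p with hblk
      set rest2 := rest.dropWhile p with hrest2
      have hblk0 : ∀ y ∈ (0:Int) :: blk, y = 0 := by
        intro y hy
        rcases List.mem_cons.mp hy with h | h
        · exact h
        · have := List.mem_takeWhile_imp h
          simpa [hp] using this
      have hs' : ((0:Int) :: rest) = ((0:Int) :: blk) ++ rest2 := by
        simp [hblk, hrest2]
      set c : Int := 1 + (blk.length : Int) with hc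
      have hc1 : 1 ≤ c := by have := Int.natCast_nonneg blk.length; omega
      have hlenr : blk.length + rest2.length = rest.length := by
        rw [hblk, hrest2, ← List.length_append, hsplit]
      have hruns : pvRunsOf ((0:Int) :: rest) = (true, c) :: pvRunsOf rest2 := by
        rw [pvRunsOf]; simp [hp, hblk, hrest2, hc]
      have hzero' := pvGoA_zeros m (((0:Int) :: rest).length : Int) ((0:Int) :: blk) hblk0 rest2 0 0
      rw [← hs'] at hzero'
      rw [hzero']
      simp only [List.length_cons]
      have harg : (0 : Int) + ((blk.length + 1 : Nat) : Int) = c := by push_cast; omega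
      rw [harg, hruns]
      cases hr2 : rest2 with
      | nil =>
        -- trailing zero run: the end check is vacuous (last index reached)
        rw [hr2] at hlenr
        simp only [List.length_nil, Nat.add_zero] at hlenr
        simp [pvGoA, pvRunsOf]
        omega
      | cons y r2' =>
        have hy : y ≠ 0 := by
          have h0 := List.head?_dropWhile_not p rest
          rw [← hrest2, hr2] at h0
          simp [hp] at h0
          exact h0
        set q := fun z : Int => decide (z = 0) == decide (y = 0) with hq
        have hsplit' : r2'.takeWhile q ++ r2'.dropWhile q = r2' := List.takeWhile_append_dropWhile
        set nblk := r2'.takeWhile q with hnblk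
        set rest3 := r2'.dropWhile q with hrest3
        have hnz : ∀ z ∈ y :: nblk, z ≠ 0 := by
          intro z hz
          rcases List.mem_cons.mp hz with h | h
          · exact h ▸ hy
          · intro h0
            have := List.mem_takeWhile_imp h
            simp [hq, h0] at this
            exact hy this
        have hr2s : y :: r2' = (y :: nblk) ++ rest3 := by
          simp [hnblk, hrest3]
        set nl : Int := 1 + (nblk.length : Int) with hnl
        have hstep := pvGoA_nonzeros m (((0:Int) :: rest).length : Int) (y :: nblk) hnz (by simp) rest3 c c
        rw [← hr2s] at hstep
        simp only [List.length_cons] at hstep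
        rw [hstep, if_neg (by omega)]
        have hruns2 : pvRunsOf (y :: r2') = (false, nl) :: pvRunsOf rest3 := by
          rw [pvRunsOf]; simp [hq, hnblk, hrest3, hnl, hy]
        have h2 : nblk.length + rest3.length = r2'.length := by
          rw [hnblk, hrest3, ← List.length_append, hsplit']
        have hG : pvGoA m (((0:Int) :: rest).length : Int) rest3 0 (c + ((y :: nblk).length : Int)) = pvF m (pvRunsOf rest3) := by
          apply pvG m _ rest3.length rest3 le_rfl
          · simp only [List.length_cons]; push_cast; omega
          · rw [hr2] at hlenr
            simp only [List.length_cons] at hlenr ⊢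
            push_cast
            omega
        simp only [List.length_cons] at hG
        rw [hG, hruns2]
        show _ = pvF m ((false, nl) :: pvRunsOf rest3)
        rw [pvF_false_cons]
    · set p := fun y : Int => decide (y = 0) == decide (x = 0) with hp
      have hsplit : rest.takeWhile p ++ rest.dropWhile p = rest := List.takeWhile_append_dropWhile
      set blk := rest.takeWhile p with hblk
      set rest2 := rest.dropWhile p with hrest2
      have hnz : ∀ y ∈ x :: blk, y ≠ 0 := by
        intro y hy
        rcases List.mem_cons.mp hy with h | h
        · exact h ▸ hx
        · intro h0
          have := List.mem_takeWhile_imp h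
          simp [hp, h0, hx] at this
      have hs' : (x :: rest) = (x :: blk) ++ rest2 := by simp [hblk, hrest2]
      have hlenr : blk.length + rest2.length = rest.length := by
        rw [hblk, hrest2, ← List.length_append, hsplit]
      have hruns : pvRunsOf (x :: rest) = (false, 1 + (blk.length : Int)) :: pvRunsOf rest2 := by
        rw [pvRunsOf]; simp [hp, hblk, hrest2, hx]
      have hstep := pvGoA_nonzeros m (((x :: rest)).length : Int) (x :: blk) hnz (by simp) rest2 0 0
      rw [← hs'] at hstep
      simp only [List.length_cons] at hstep
      simp only [List.length_cons]
      rw [hstep, if_neg (by omega)]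
      have hG : pvGoA m (((x :: rest)).length : Int) rest2 0 (0 + ((x :: blk).length : Int)) = pvF m (pvRunsOf rest2) := by
        apply pvG m _ rest2.length rest2 le_rfl
        · simp only [List.length_cons]; push_cast; omega
        · simp only [List.length_cons]; push_cast; omega
      simp only [List.length_cons] at hG
      rw [hG, hruns]
      rfl

theorem hc8_all_eq (array : List (List Int)) (m : Int) :
    hc8_min_consec_days_off array m = hc8_min_consec_days_off_alt array m := by
  induction array with
  | nil => rfl
  | cons wd rest ih =>
    show (pvGoA m (wd.length : Int) wd 0 0 && hc8_min_consec_days_off rest m) = _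
    rw [ih, row_eq]
    rfl

-- ===== VERDICT (by name: the statement is the Claim_ definition above) =====
theorem hc8_min_consec_days_off_spec : Claim_equal_hc8_min_consec_days_off := by
  intro array m _
  exact hc8_all_eq array m
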